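-- pv_equiv track=rewrite | github.com/vishalbelsare/resolve-march-native | resolve_march_native/_gcc/engine.py | _extract_arch_from_flags
-- ===== SOURCE A (Python) =====
-- def _extract_arch_from_flags(flags):
--     for prefix in ('-march=', '-mcpu='):
--         for flag in flags:
--             if flag.startswith(prefix):
--                 arch = flag[len(prefix):]
--                 if arch:
--                     return arch
--     raise ValueError('No entry -m(arch|cpu)=.. found in: %s' %
--                      ' '.join(sorted(flags)))
-- ===== SOURCE B (Python) =====
-- def _extract_arch_from_flags(flags):
--     # One flag-driven pass recording the first non-empty value for each prefix,
--     # then explicit priority: -march= before -mcpu=.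
--     march = None
--     mcpu = None
--     for flag in flags:
--         if march is None and flag.startswith('-march=') and flag[7:]:
--             march = flag[7:]
--         if mcpu is None and flag.startswith('-mcpu=') and flag[6:]:
--             mcpu = flag[6:]
--     if march is not None:
--         return march
--     if mcpu is not None:
--         return mcpu
--     raise ValueError('No entry -m(arch|cpu)=.. found in: %s' %
--                      ' '.join(sorted(flags)))
-- ===== Notes on version B (the rewrite author's own statement) =====
-- stated objective: alternative
-- what changed: Replaces A's two prefix-driven scans over flags with a single flag-driven pass that records the first non-empty value per prefix in two accumulators, then an explicit priority lookup (-march= before -mcpu=).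
import Mathlib
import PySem

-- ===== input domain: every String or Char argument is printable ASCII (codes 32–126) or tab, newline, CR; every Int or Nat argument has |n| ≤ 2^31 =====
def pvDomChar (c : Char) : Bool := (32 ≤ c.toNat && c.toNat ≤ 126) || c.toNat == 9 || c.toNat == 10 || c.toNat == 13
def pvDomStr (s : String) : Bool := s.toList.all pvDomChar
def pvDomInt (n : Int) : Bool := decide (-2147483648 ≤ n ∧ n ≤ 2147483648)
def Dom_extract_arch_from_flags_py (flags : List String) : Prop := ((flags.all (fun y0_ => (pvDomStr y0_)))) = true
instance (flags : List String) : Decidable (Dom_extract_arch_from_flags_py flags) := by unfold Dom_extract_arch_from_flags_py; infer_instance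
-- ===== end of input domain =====

-- B is a structural alternative to A: one flag-driven pass with two accumulators instead of
-- A's two prefix-driven scans; return values (and the raise condition) are identical.

-- ===== PORT A =====
-- inner loop of A for one prefix: first flag starting with `prefix` whose remainder is non-empty
def pvScanA (pfx : String) (plen : Int) : List String → Option String
  | [] => none
  | flag :: rest =>
    if PySem.Str.startswith flag pfx then
      let arch := PySem.Str.slice flag (some plen) none
      if arch ≠ "" then some arch else pvScanA pfx plen rest
    else pvScanA pfx plen rest

def extract_arch_from_flags_py (flags : List String) : String :=
  -- for prefix in ('-march=', '-mcpu='): inner scan; then raise ValueError(message)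
  match pvScanA "-march=" 7 flags with
  | some arch => arch
  | none =>
    match pvScanA "-mcpu=" 6 flags with
    | some arch => arch
    | none =>
      "No entry -m(arch|cpu)=.. found in: " ++
        PySem.Str.join " " (PySem.List.sorted flags (fun x => x) false)

-- ===== PORT B =====
-- one pass: (march?, mcpu?) accumulators, each set to the first non-empty value for its prefix
def pvStepB (s : Option String × Option String) (flag : String) : Option String × Option String :=
  let s1 := if s.1 = none ∧ PySem.Str.startswith flag "-march=" = true ∧
               PySem.Str.slice flag (some 7) none ≠ "" then
              some (PySem.Str.slice flag (some 7) none) else s.1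
  let s2 := if s.2 = none ∧ PySem.Str.startswith flag "-mcpu=" = true ∧
               PySem.Str.slice flag (some 6) none ≠ "" then
              some (PySem.Str.slice flag (some 6) none) else s.2
  (s1, s2)

def extract_arch_from_flags_py_alt (flags : List String) : String :=
  let st := flags.foldl pvStepB (none, none)
  match st.1 with
  | some march => march
  | none =>
    match st.2 with
    | some mcpu => mcpu
    | none =>
      "No entry -m(arch|cpu)=.. found in: " ++
        PySem.Str.join " " (PySem.List.sorted flags (fun x => x) false)

-- ===== PRECONDITION & SPEC =====
-- Pre_ excludes exactly the inputs on which Python A raises ValueError: no flag carries a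
-- non-empty value for '-march=' or '-mcpu='.  (B raises identically there.)
def Pre_extract_arch_from_flags_py (flags : List String) : Prop :=
  ∃ f ∈ flags,
    (PySem.Str.startswith f "-march=" = true ∧ PySem.Str.slice f (some 7) none ≠ "") ∨
    (PySem.Str.startswith f "-mcpu=" = true ∧ PySem.Str.slice f (some 6) none ≠ "")
instance (flags : List String) : Decidable (Pre_extract_arch_from_flags_py flags) := by
  unfold Pre_extract_arch_from_flags_py; infer_instance

def pvWitness_extract_arch_from_flags_py : List String := ["-O2", "-march=native"]

def Spec_extract_arch_from_flags_py (flags : List String) (out : String) : Prop :=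
  out = extract_arch_from_flags_py_alt flags
instance (flags : List String) (out : String) :
    Decidable (Spec_extract_arch_from_flags_py flags out) := by
  unfold Spec_extract_arch_from_flags_py; infer_instance

-- ===== CLAIM (what is proved, stated in full; the proofs are below) =====
def Claim_equal_extract_arch_from_flags_py : Prop :=
  ∀ (flags : List String), Dom_extract_arch_from_flags_py flags →
    Pre_extract_arch_from_flags_py flags →
    Spec_extract_arch_from_flags_py flags (extract_arch_from_flags_py flags)

-- ===== LEMMAS AND PROOFS =====

-- B's first accumulator, run from state m, is m if already set, else A's '-march=' scan
theorem pvFold_fst (flags : List String) (m c : Option String) :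
    (flags.foldl pvStepB (m, c)).1 =
      (match m with | some a => some a | none => pvScanA "-march=" 7 flags) := by
  induction flags generalizing m c with
  | nil => cases m <;> simp [pvScanA]
  | cons f rest ih =>
    simp only [List.foldl_cons, pvStepB]
    rw [ih]
    cases m with
    | some a => simp
    | none =>
      simp only [pvScanA]
      by_cases hs : PySem.Str.startswith f "-march=" = true
      · by_cases he : PySem.Str.slice f (some 7) none = ""
        · rw [if_neg (fun h => h.2.2 he), if_pos hs, if_neg (not_not_intro he)]
        · rw [if_pos ⟨trivial, hs, he⟩, if_pos hs, if_pos he]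
      · rw [if_neg (fun h => hs h.2.1), if_neg hs]

-- same for the second accumulator and the '-mcpu=' scan
theorem pvFold_snd (flags : List String) (m c : Option String) :
    (flags.foldl pvStepB (m, c)).2 =
      (match c with | some a => some a | none => pvScanA "-mcpu=" 6 flags) := by
  induction flags generalizing m c with
  | nil => cases c <;> simp [pvScanA]
  | cons f rest ih =>
    simp only [List.foldl_cons, pvStepB]
    rw [ih]
    cases c with
    | some a => simp
    | none =>
      simp only [pvScanA]
      by_cases hs : PySem.Str.startswith f "-mcpu=" = true
      · by_cases he : PySem.Str.slice f (some 6) none = ""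
        · rw [if_neg (fun h => h.2.2 he), if_pos hs, if_neg (not_not_intro he)]
        · rw [if_pos ⟨trivial, hs, he⟩, if_pos hs, if_pos he]
      · rw [if_neg (fun h => hs h.2.1), if_neg hs]

-- ===== VERDICT (by name: the statement is the Claim_ definition above) =====
theorem extract_arch_from_flags_py_spec : Claim_equal_extract_arch_from_flags_py := by
  intro flags _ _
  unfold Spec_extract_arch_from_flags_py
  simp only [extract_arch_from_flags_py, extract_arch_from_flags_py_alt,
    pvFold_fst, pvFold_snd]
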